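-- pv_equiv track=rewrite | github.com/Kanghu/repotrack | python/RepositoryStructure.py | compareMethodList
-- ===== SOURCE A (Python) =====
-- def compareMethodList(before, after):
--     added, removed = 0, 0
--     for func in before:
--         if func not in after:
--             removed += 1
--
--     for func in after:
--         if func not in before:
--             added += 1
--
--     return (added, removed)
-- ===== SOURCE B (Python) =====
-- def compareMethodList(before, after):
--     cb = {}
--     for f in before:
--         cb[f] = cb.get(f, 0) + 1
--     ca = {}
--     for f in after:
--         ca[f] = ca.get(f, 0) + 1
--     kb = sorted(cb)
--     ka = sorted(ca)
--     added, removed = 0, 0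
--     i, j = 0, 0
--     while i < len(kb) and j < len(ka):
--         if kb[i] < ka[j]:
--             removed += cb[kb[i]]
--             i += 1
--         elif ka[j] < kb[i]:
--             added += ca[ka[j]]
--             j += 1
--         else:
--             i += 1
--             j += 1
--     while i < len(kb):
--         removed += cb[kb[i]]
--         i += 1
--     while j < len(ka):
--         added += ca[ka[j]]
--         j += 1
--     return (added, removed)
-- ===== Notes on version B (the rewrite author's own statement) =====
-- stated objective: faster
-- what changed: Replaces A's per-element quadratic membership scans by building a frequency table per list, sorting the distinct keys, and a two-pointer sorted merge that sums the counts of keys unique to each side.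
import Mathlib
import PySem

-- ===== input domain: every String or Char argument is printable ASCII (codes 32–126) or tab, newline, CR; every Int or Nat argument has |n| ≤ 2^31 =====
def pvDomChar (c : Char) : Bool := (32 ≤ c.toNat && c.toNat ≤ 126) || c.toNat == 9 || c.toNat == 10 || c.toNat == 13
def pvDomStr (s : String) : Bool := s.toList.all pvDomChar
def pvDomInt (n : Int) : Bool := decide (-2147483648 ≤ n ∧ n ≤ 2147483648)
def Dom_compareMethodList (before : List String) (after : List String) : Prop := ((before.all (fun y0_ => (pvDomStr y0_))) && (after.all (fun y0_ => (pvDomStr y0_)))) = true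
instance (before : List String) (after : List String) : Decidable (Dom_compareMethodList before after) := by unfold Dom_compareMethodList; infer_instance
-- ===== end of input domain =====

-- B builds per-list frequency tables, sorts the distinct keys, and computes both counts by a
-- two-pointer merge of the sorted key lists (objective: faster on large inputs).


-- ===== PORT A =====
def compareMethodList (before : List String) (after : List String) : Int × Int :=
  let removed : Int := before.foldl (fun acc func => if func ∈ after then acc else acc + 1) 0
  let added : Int := after.foldl (fun acc func => if func ∈ before then acc else acc + 1) 0
  (added, removed)

-- ===== PORT B =====
-- the two-pointer merge of the sorted key lists (a list consumed from the front = a pointer advancing)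
def pvMerge (cb ca : PySem.Dict String Int) :
    List String → List String → Int → Int → Int × Int
  | x :: kb, y :: ka, added, removed =>
    if x < y then pvMerge cb ca kb (y :: ka) added (removed + cb.getD x 0)
    else if y < x then pvMerge cb ca (x :: kb) ka (added + ca.getD y 0) removed
    else pvMerge cb ca kb ka added removed
  | kb, [], added, removed => (added, kb.foldl (fun r k => r + cb.getD k 0) removed)
  | [], ka, added, removed => (ka.foldl (fun r k => r + ca.getD k 0) added, removed)
  termination_by kb ka _ _ => kb.length + ka.length

def compareMethodList_alt (before : List String) (after : List String) : Int × Int :=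
  let cb := before.foldl (fun d f => d.insert f (d.getD f 0 + 1)) (PySem.Dict.empty : PySem.Dict String Int)
  let ca := after.foldl (fun d f => d.insert f (d.getD f 0 + 1)) (PySem.Dict.empty : PySem.Dict String Int)
  let kb := PySem.List.sorted cb.keys (fun x => x) false
  let ka := PySem.List.sorted ca.keys (fun x => x) false
  pvMerge cb ca kb ka 0 0

-- ===== PRECONDITION & SPEC =====
def Spec_compareMethodList (before : List String) (after : List String) (out : Int × Int) : Prop := out = compareMethodList_alt before after
instance (before : List String) (after : List String) (out : Int × Int) : Decidable (Spec_compareMethodList before after out) := by unfold Spec_compareMethodList; infer_instance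

-- ===== CLAIM (what is proved, stated in full; the proofs are below) =====
def Claim_equal_compareMethodList : Prop := ∀ (before : List String) (after : List String), Dom_compareMethodList before after → Spec_compareMethodList before after (compareMethodList before after)

-- ===== LEMMAS AND PROOFS =====

-- A's loop counts the elements FAILING the membership test.
theorem foldl_count_not (ys : List String) (l : List String) (a : Int) :
    List.foldl (fun acc func => if func ∈ ys then acc else acc + 1) a l
      = a + (List.countP (fun x => !decide (x ∈ ys)) l : Int) := by
  have h := PySem.List.foldl_count_if (fun x => !decide (x ∈ ys)) l a
  rw [← h]
  apply PySem.List.foldl_congr_mem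
  intro acc x _
  by_cases hx : x ∈ ys <;> simp [hx]

-- the merge over strictly increasing key lists sums, on each side, the counts of keys absent from the other
theorem pvMerge_spec (cb ca : PySem.Dict String Int) (kb ka : List String)
    (hb : kb.Pairwise (· < ·)) (ha : ka.Pairwise (· < ·)) (added removed : Int) :
    pvMerge cb ca kb ka added removed
      = (added + ((ka.filter (fun y => !decide (y ∈ kb))).map (fun k => ca.getD k 0)).sum,
         removed + ((kb.filter (fun x => !decide (x ∈ ka))).map (fun k => cb.getD k 0)).sum) := by
  fun_induction pvMerge cb ca kb ka added removed with
  | case1 x kb' y ka' added removed hxy ih =>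
    obtain ⟨hx, hb'⟩ := List.pairwise_cons.mp hb
    obtain ⟨hy, ha'⟩ := List.pairwise_cons.mp ha
    rw [ih hb' ha]
    have hxe : x ∉ y :: ka' := by
      intro h
      rcases List.mem_cons.mp h with h | h
      · exact lt_irrefl x (h ▸ hxy)
      · exact lt_asymm hxy (hy x h)
    have hfe : List.filter (fun z => !decide (z ∈ x :: kb')) (y :: ka')
        = List.filter (fun z => !decide (z ∈ kb')) (y :: ka') := by
      apply List.filter_congr
      intro z hz
      have hxz : x < z := by
        rcases List.mem_cons.mp hz with h | h
        · exact h ▸ hxy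
        · exact lt_trans hxy (hy z h)
      have hne : z ≠ x := ne_of_gt hxz
      simp [List.mem_cons, hne]
    rw [hfe]
    have hfr : List.filter (fun z => !decide (z ∈ y :: ka')) (x :: kb')
        = x :: List.filter (fun z => !decide (z ∈ y :: ka')) kb' := by
      simp only [List.mem_cons, not_or] at hxe
      simp [hxe.1, hxe.2]
    rw [hfr]
    simp [add_assoc]
  | case2 x kb' y ka' added removed hxy hyx ih =>
    obtain ⟨hx, hb'⟩ := List.pairwise_cons.mp hb
    obtain ⟨hy, ha'⟩ := List.pairwise_cons.mp ha
    rw [ih hb ha']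
    have hye : y ∉ x :: kb' := by
      intro h
      rcases List.mem_cons.mp h with h | h
      · exact lt_irrefl y (h ▸ hyx)
      · exact lt_asymm hyx (hx y h)
    have hfe : List.filter (fun z => !decide (z ∈ y :: ka')) (x :: kb')
        = List.filter (fun z => !decide (z ∈ ka')) (x :: kb') := by
      apply List.filter_congr
      intro z hz
      have hyz : y < z := by
        rcases List.mem_cons.mp hz with h | h
        · exact h ▸ hyx
        · exact lt_trans hyx (hx z h)
      have hne : z ≠ y := ne_of_gt hyz
      simp [List.mem_cons, hne]
    rw [hfe]
    have hfa : List.filter (fun z => !decide (z ∈ x :: kb')) (y :: ka')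
        = y :: List.filter (fun z => !decide (z ∈ x :: kb')) ka' := by
      simp only [List.mem_cons, not_or] at hye
      simp [hye.1, hye.2]
    rw [hfa]
    simp [add_assoc]
  | case3 x kb' y ka' added removed hxy hyx ih =>
    obtain ⟨hx, hb'⟩ := List.pairwise_cons.mp hb
    obtain ⟨hy, ha'⟩ := List.pairwise_cons.mp ha
    rw [ih hb' ha']
    have heq : x = y := le_antisymm (not_lt.mp hyx) (not_lt.mp hxy)
    subst heq
    have hfr : List.filter (fun z => !decide (z ∈ x :: ka')) (x :: kb')
        = List.filter (fun z => !decide (z ∈ ka')) kb' := by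
      rw [List.filter_cons]
      simp only [List.mem_cons, true_or, decide_true, Bool.not_true]
      apply List.filter_congr
      intro z hz
      have hne : z ≠ x := ne_of_gt (hx z hz)
      simp [hne]
    have hfa : List.filter (fun z => !decide (z ∈ x :: kb')) (x :: ka')
        = List.filter (fun z => !decide (z ∈ kb')) ka' := by
      rw [List.filter_cons]
      simp only [List.mem_cons, true_or, decide_true, Bool.not_true]
      apply List.filter_congr
      intro z hz
      have hne : z ≠ x := ne_of_gt (hy z hz)
      simp [hne]
    rw [hfr, hfa]
  | case4 a b c =>
    simp [PySem.List.foldl_add]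
  | case5 a b c d =>
    simp [PySem.List.foldl_add]

-- summing, over the distinct elements of xs that satisfy P, the multiplicity of each in xs
-- counts exactly the elements of xs satisfying P
theorem sum_counts_ofList (xs : List String) (P : String → Bool) :
    (((PySem.Set.ofList xs).filter P).map (fun k => (List.count k xs : Int))).sum
      = (List.countP P xs : Int) := by
  have hperm : (PySem.Set.ofList xs).Perm xs.dedup := by
    rw [List.perm_ext_iff_of_nodup (PySem.Set.nodup_ofList xs) xs.nodup_dedup]
    intro a
    rw [PySem.Set.mem_ofList, List.mem_dedup]
  have h2 : (((PySem.Set.ofList xs).filter P).map (fun k => (List.count k xs : Int))).sum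
      = ((xs.dedup.filter P).map (fun k => (List.count k xs : Int))).sum :=
    ((hperm.filter P).map _).sum_eq
  rw [h2]
  have h3 := List.sum_map_count_dedup_filter_eq_countP P xs
  have : ((xs.dedup.filter P).map (fun k => (List.count k xs : Int))).sum
      = (((xs.dedup.filter P).map (fun k => List.count k xs)).sum : Int) := by
    induction (xs.dedup.filter P) with
    | nil => simp
    | cons h t ih => simp [ih]
  rw [this, h3]

-- one side of B: the merge contribution of a sorted key list equals A's corresponding loop count
theorem side_eq (xs ys : List String) :
    (((PySem.List.sorted (PySem.Set.ofList xs) (fun x => x) false).filter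
        (fun x => !decide (x ∈ PySem.List.sorted (PySem.Set.ofList ys) (fun x => x) false))).map
        (fun k => (PySem.Dict.counter xs).getD k 0)).sum
      = (List.countP (fun x => !decide (x ∈ ys)) xs : Int) := by
  simp only [PySem.List.mem_sorted, PySem.Set.mem_ofList, PySem.Dict.getD_counter]
  have hperm := PySem.List.sorted_perm (PySem.Set.ofList xs) (fun x => x) false
  rw [((hperm.filter _).map _).sum_eq]
  exact sum_counts_ofList xs (fun x => !decide (x ∈ ys))

-- ===== VERDICT (by name: the statement is the Claim_ definition above) =====
theorem compareMethodList_spec : Claim_equal_compareMethodList := by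
  intro before after _
  unfold Spec_compareMethodList compareMethodList compareMethodList_alt
  simp only [PySem.Dict.foldl_insert_getD_add_one_eq_counter, PySem.Dict.keys_counter]
  rw [pvMerge_spec _ _ _ _ (PySem.List.sorted_ofList_pairwise_lt before)
        (PySem.List.sorted_ofList_pairwise_lt after) 0 0]
  rw [foldl_count_not after before 0, foldl_count_not before after 0]
  rw [side_eq before after, side_eq after before]
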